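-- pv_equiv track=rewrite | github.com/PappKriszti99/Python | 2022.11.30_Otszaz/fgvk.py | OsszSzamol
-- ===== SOURCE A (Python) =====
-- def OsszSzamol(db):
--     ossz = 0
--     for i in range(0,db):
--         if i < 3:
--             ossz += 500-(50*i)
--         else:
--             ossz += 400
--     return ossz
-- ===== SOURCE B (Python) =====
-- def OsszSzamol(db):
--     # closed form: 500+450+400 for the first three terms, then 400 each
--     if db <= 0:
--         return 0
--     if db == 1:
--         return 500
--     if db == 2:
--         return 950
--     return 1350 + 400 * (db - 3)
-- ===== Notes on version B (the rewrite author's own statement) =====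
-- stated objective: faster
-- what changed: Replaced the O(db) accumulation loop by an O(1) closed-form branch on db: the first three terms summed explicitly, then a constant term times the remaining count.
import Mathlib
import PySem

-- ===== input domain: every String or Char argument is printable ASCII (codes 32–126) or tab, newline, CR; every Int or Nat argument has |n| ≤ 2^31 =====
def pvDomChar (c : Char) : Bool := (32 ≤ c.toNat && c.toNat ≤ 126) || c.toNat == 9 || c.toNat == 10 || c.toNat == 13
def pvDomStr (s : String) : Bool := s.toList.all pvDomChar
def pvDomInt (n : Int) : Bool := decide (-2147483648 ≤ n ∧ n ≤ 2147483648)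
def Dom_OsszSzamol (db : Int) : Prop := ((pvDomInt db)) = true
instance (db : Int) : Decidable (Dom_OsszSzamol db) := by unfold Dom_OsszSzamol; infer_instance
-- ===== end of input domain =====

-- B replaces A's O(db) accumulation loop by an O(1) closed-form branch on db.


-- ===== PORT A =====
def OsszSzamol (db : Int) : Int :=
  (PySem.List.pyRange 0 db 1).foldl
    (fun ossz i => if i < 3 then ossz + (500 - 50 * i) else ossz + 400) 0

-- ===== PORT B =====
def OsszSzamol_alt (db : Int) : Int :=
  if db ≤ 0 then 0
  else if db = 1 then 500
  else if db = 2 then 950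
  else 1350 + 400 * (db - 3)

-- ===== PRECONDITION & SPEC =====
def Spec_OsszSzamol (db : Int) (out : Int) : Prop := out = OsszSzamol_alt db
instance (db : Int) (out : Int) : Decidable (Spec_OsszSzamol db out) := by unfold Spec_OsszSzamol; infer_instance

-- ===== CLAIM (what is proved, stated in full; the proofs are below) =====
def Claim_equal_OsszSzamol : Prop := ∀ (db : Int), Dom_OsszSzamol db → Spec_OsszSzamol db (OsszSzamol db)

-- ===== LEMMAS AND PROOFS =====

-- A's loop in closed form for db ≥ 3, by induction on the tail length.
lemma ossz_ge_three (db : Int) (h : 3 ≤ db) : OsszSzamol db = 1350 + 400 * (db - 3) := by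
  have h0 : (0 : Int) ≤ db - 3 := by omega
  obtain ⟨n, hn⟩ : ∃ n : ℕ, db = 3 + n := ⟨(db - 3).toNat, by omega⟩
  subst hn
  induction n with
  | zero => decide
  | succ k ih =>
    have hsplit : PySem.List.pyRange 0 (3 + (k + 1 : ℕ)) 1
        = PySem.List.pyRange 0 (3 + (k : ℕ)) 1 ++ [(3 + (k : ℕ) : Int)] := by
      have : (3 + ((k : ℕ) + 1 : ℕ) : Int) = (3 + (k : ℕ) : Int) + 1 := by push_cast; ring
      rw [this, PySem.List.pyRange_one_succ_right (by positivity)]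
    unfold OsszSzamol at *
    rw [hsplit, List.foldl_append]
    have hge : ¬ ((3 + (k : ℕ) : Int) < 3) := by omega
    simp only [List.foldl_cons, List.foldl_nil, if_neg hge]
    have := ih (by omega) (by omega)
    rw [this]
    push_cast
    ring

-- ===== VERDICT (by name: the statement is the Claim_ definition above) =====
theorem OsszSzamol_spec : Claim_equal_OsszSzamol := by
  intro db _
  unfold Spec_OsszSzamol OsszSzamol_alt
  by_cases h0 : db ≤ 0
  · rw [if_pos h0]
    unfold OsszSzamol
    rw [PySem.List.pyRange_one_eq_nil (by omega)]
    rfl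
  · rw [if_neg h0]
    by_cases h1 : db = 1
    · subst h1; decide
    · rw [if_neg h1]
      by_cases h2 : db = 2
      · subst h2; decide
      · rw [if_neg h2]
        exact ossz_ge_three db (by omega)
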